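-- pv_equiv track=rewrite | github.com/durellinux/coding-exercises | competitions/codejam/2022/qualification/chainreactions/solve.py | solve
-- ===== SOURCE A (Python) =====
-- def solve(fun, next_node):
--     sinks = []
--     prev_nodes = dict()
--
--     for n in range(len(next_node)):
--         if next_node[n] == 0:
--             sinks.append(n)
--
--     for n in range(len(next_node)):
--         prev_nodes[n] = []
--
--     for n in range(len(next_node)):
--         if next_node[n] != 0:
--             prev_nodes[next_node[n] - 1].append(n)
--
--     result = 0
--     for s in sinks:
--         [ongoing, stopped] = compute(s, prev_nodes, fun)
--         result += stopped + ongoing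
--
--     return result
--
-- def compute(s, prev_nodes, fun):
--
--     if len(prev_nodes[s]) == 0:
--         return [fun[s], 0]
--
--     min_ongoing = None
--     stopped = 0
--     for p in prev_nodes[s]:
--         [inner_ongoing, inner_stopped] = compute(p, prev_nodes, fun)
--         # heappush(ongoing, inner_ongoing)
--         if min_ongoing is None or inner_ongoing < min_ongoing:
--             min_ongoing = inner_ongoing
--         stopped += inner_stopped + inner_ongoing
--
--     # min_fun = heappop(ongoing)
--     stopped -= min_ongoing
--
--     return [max(fun[s], min_ongoing), stopped]
-- ===== SOURCE B (Python) =====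
-- def solve(fun, next_node):
--     n = len(next_node)
--     sinks = [i for i, v in enumerate(next_node) if v == 0]
--     children = [[] for _ in range(n)]
--     for i, v in enumerate(next_node):
--         if v != 0:
--             children[v - 1].append(i)
--     ongoing = {}
--     stopped = {}
--     total = 0
--     for s in sinks:
--         stack = [(s, False)]
--         while stack:
--             node, ready = stack.pop()
--             if not ready:
--                 stack.append((node, True))
--                 for c in children[node]:
--                     stack.append((c, False))
--             else:
--                 cs = children[node]
--                 if not cs:
--                     ongoing[node] = fun[node]
--                     stopped[node] = 0
--                 else:
--                     m = min(ongoing[c] for c in cs)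
--                     ongoing[node] = max(fun[node], m)
--                     stopped[node] = sum(stopped[c] + ongoing[c] for c in cs) - m
--         total += stopped[s] + ongoing[s]
--     return total
-- ===== Notes on version B (the rewrite author's own statement) =====
-- stated objective: alternative
-- what changed: The recursive tree DP (helper 'compute' recursing through prev_nodes) is replaced by an explicit-stack iterative post-order DFS that fills two dicts ongoing/stopped, with children buckets built in one enumerate pass instead of A's three range loops and dict of lists.
-- outside the precondition, e.g. on solve([], [2, 1]): A returns 0, B returns 0; on solve([7], [0, 3, 2]): A returns 7, B returns 7
import Mathlib
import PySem

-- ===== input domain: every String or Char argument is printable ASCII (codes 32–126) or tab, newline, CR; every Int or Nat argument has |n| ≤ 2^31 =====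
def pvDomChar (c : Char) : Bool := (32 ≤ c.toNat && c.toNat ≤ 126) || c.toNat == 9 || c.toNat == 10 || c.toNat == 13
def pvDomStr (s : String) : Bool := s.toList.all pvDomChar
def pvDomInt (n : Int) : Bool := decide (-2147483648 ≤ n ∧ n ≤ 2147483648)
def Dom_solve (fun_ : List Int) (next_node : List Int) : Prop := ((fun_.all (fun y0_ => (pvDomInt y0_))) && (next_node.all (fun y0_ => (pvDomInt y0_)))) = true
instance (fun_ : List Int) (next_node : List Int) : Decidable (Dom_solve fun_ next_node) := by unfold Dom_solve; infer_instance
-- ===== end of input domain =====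

-- B replaces A's recursive tree DP by an explicit-stack iterative post-order DFS
-- over children buckets built in one pass (same O(n) cost, different decomposition).

-- ===== PORT A =====

-- prev_nodes: dict built by A's three loops (sinks list, empty buckets, appends)
def pvSinksA (next_node : List Int) : List Int :=
  (PySem.List.pyRange 0 (next_node.length : Int) 1).foldl
    (fun acc i => if PySem.List.pyGetD next_node i 0 == 0 then acc ++ [i] else acc) []

def pvPrevsA (next_node : List Int) : PySem.Dict Int (List Int) :=
  let d0 := (PySem.List.pyRange 0 (next_node.length : Int) 1).foldl
    (fun d i => d.insert i ([] : List Int)) PySem.Dict.empty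
  (PySem.List.pyRange 0 (next_node.length : Int) 1).foldl
    (fun d i => if PySem.List.pyGetD next_node i 0 == 0 then d
      else d.modify (PySem.List.pyGetD next_node i 0 - 1) [] (· ++ [i])) d0

-- compute(s, prev_nodes, fun): the recursion is fuel-bounded (depth ≤ len(next_node)
-- on every admitted input); out of fuel it returns (0, 0), which is never reached under Pre_.
def pvComputeA (prevs : PySem.Dict Int (List Int)) (fun_ : List Int) :
    Nat → Int → Int × Int
  | 0, _ => (0, 0)
  | f + 1, s =>
    let ps := prevs.getD s []
    if ps = [] then (PySem.List.pyGetD fun_ s 0, 0)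
    else
      let r := ps.foldl
        (fun (acc : Option Int × Int) p =>
          let io := (pvComputeA prevs fun_ f p).1
          let is := (pvComputeA prevs fun_ f p).2
          ((match acc.1 with
            | none => some io
            | some m => if io < m then some io else some m), acc.2 + is + io))
        (none, 0)
      let m := r.1.getD 0
      (max (PySem.List.pyGetD fun_ s 0) m, r.2 - m)

def solve (fun_ : List Int) (next_node : List Int) : Int :=
  (pvSinksA next_node).foldl
    (fun result s =>
      let os := pvComputeA (pvPrevsA next_node) fun_ (next_node.length + 1) s
      result + (os.2 + os.1)) 0

-- ===== PORT B =====

-- children buckets: one pass over enumerate(next_node)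
def pvChildrenB (next_node : List Int) : List (List Int) :=
  (PySem.List.enumerate next_node 0).foldl
    (fun ch p => if p.2 == 0 then ch
      else PySem.List.pySetD ch (p.2 - 1) (PySem.List.pyGetD ch (p.2 - 1) [] ++ [p.1]))
    (List.replicate next_node.length ([] : List Int))

def pvSinksB (next_node : List Int) : List Int :=
  ((PySem.List.enumerate next_node 0).filter (fun p => p.2 == 0)).map (·.1)

-- the while-stack loop; fuel 2*n+1 is consumed one unit per iteration and
-- always suffices under Pre_ (each tree node is popped exactly twice)
def pvLoopB (ch : List (List Int)) (fun_ : List Int) :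
    Nat → List (Int × Bool) → PySem.Dict Int Int × PySem.Dict Int Int →
    PySem.Dict Int Int × PySem.Dict Int Int
  | 0, _, σ => σ
  | _ + 1, [], σ => σ
  | f + 1, (v, rdy) :: rest, (og, st) =>
    if rdy = false then
      pvLoopB ch fun_ f
        (((PySem.List.pyGetD ch v []).reverse.map (fun c => (c, false))) ++ (v, true) :: rest)
        (og, st)
    else
      let cs := PySem.List.pyGetD ch v []
      if cs = [] then
        pvLoopB ch fun_ f rest (og.insert v (PySem.List.pyGetD fun_ v 0), st.insert v 0)
      else
        let m := (PySem.List.min? (cs.map (fun c => og.getD c 0)) (fun x => x)).getD 0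
        let og' := og.insert v (max (PySem.List.pyGetD fun_ v 0) m)
        pvLoopB ch fun_ f rest
          (og', st.insert v ((cs.map (fun c => st.getD c 0 + og'.getD c 0)).sum - m))

def solve_alt (fun_ : List Int) (next_node : List Int) : Int :=
  let children := pvChildrenB next_node
  let res := (pvSinksB next_node).foldl
    (fun (σ : (PySem.Dict Int Int × PySem.Dict Int Int) × Int) s =>
      let σ' := pvLoopB children fun_ (2 * next_node.length + 1) [(s, false)] σ.1
      (σ', σ.2 + (σ'.2.getD s 0 + σ'.1.getD s 0)))
    ((PySem.Dict.empty, PySem.Dict.empty), 0)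
  res.2

-- ===== PRECONDITION & SPEC =====
-- Pre_ excludes next-pointer values outside [0, len(next_node)] (on which A raises KeyError)
-- and inputs with len(fun_) < len(next_node), on which A raises IndexError except in the
-- corner where every module missing from fun_ is unreachable from a sink (A then returns
-- without ever indexing fun_ there; B returns the same value on those excluded corners).
def Pre_solve (fun_ : List Int) (next_node : List Int) : Prop :=
  next_node.length ≤ fun_.length ∧
  ∀ v ∈ next_node, 0 ≤ v ∧ v ≤ (next_node.length : Int)
instance (fun_ : List Int) (next_node : List Int) : Decidable (Pre_solve fun_ next_node) := by
  unfold Pre_solve; infer_instance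

def pvWitness_solve : List Int × List Int := ([3, 2, 1], [2, 3, 0])

def Spec_solve (fun_ : List Int) (next_node : List Int) (out : Int) : Prop :=
  out = solve_alt fun_ next_node
instance (fun_ : List Int) (next_node : List Int) (out : Int) :
    Decidable (Spec_solve fun_ next_node out) := by unfold Spec_solve; infer_instance

-- ===== CLAIM (what is proved, stated in full; the proofs are below) =====
def Claim_equal_solve : Prop := ∀ (fun_ : List Int) (next_node : List Int),
  Dom_solve fun_ next_node → Pre_solve fun_ next_node →
  Spec_solve fun_ next_node (solve fun_ next_node)

-- ===== LEMMAS AND PROOFS =====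

-- next pointer, parent step, depth predicate, iterated step, children, subtree
def pvNx (nn : List Int) (i : Int) : Int := PySem.List.pyGetD nn i 0
def pvStep (nn : List Int) (i : Int) : Int := pvNx nn i - 1

def pvIter (nn : List Int) : Nat → Int → Int
  | 0, u => u
  | t + 1, u => pvIter nn t (pvStep nn u)

def pvRd (nn : List Int) : Nat → Int → Bool
  | 0, v => pvNx nn v == 0
  | d + 1, v => (!(pvNx nn v == 0)) && pvRd nn d (pvStep nn v)

def pvCh (nn : List Int) (c : Int) : List Int :=
  (PySem.List.pyRange 0 (nn.length : Int) 1).filter (fun i => pvNx nn i == c + 1)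

def pvT (nn : List Int) (d : Nat) (v : Int) : Finset Int :=
  ((PySem.List.pyRange 0 (nn.length : Int) 1).filter
    (fun u => (List.range nn.length).any
      (fun e => pvRd nn e u && decide (d ≤ e) && (pvIter nn (e - d) u == v)))).toFinset

theorem mem_pvCh {nn : List Int} {c i : Int} :
    i ∈ pvCh nn c ↔ (0 ≤ i ∧ i < (nn.length : Int)) ∧ pvNx nn i = c + 1 := by
  simp [pvCh, List.mem_filter, PySem.List.mem_pyRange_one]

theorem pvRd_unique {nn : List Int} : ∀ {e e' : Nat} {v : Int},
    pvRd nn e v → pvRd nn e' v → e = e' := by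
  intro e e' v h h'
  induction e generalizing e' v with
  | zero =>
    cases e' with
    | zero => rfl
    | succ e' => simp [pvRd] at h h'; simp [h] at h'
  | succ e ih =>
    cases e' with
    | zero => simp [pvRd] at h h'; simp [h'] at h
    | succ e' =>
      simp [pvRd] at h h'
      exact congrArg Nat.succ (ih h.2 h'.2)

theorem pvNx_range {fun_ nn : List Int} (hPre : Pre_solve fun_ nn) {v : Int}
    (h0 : 0 ≤ v) (h1 : v < (nn.length : Int)) :
    0 ≤ pvNx nn v ∧ pvNx nn v ≤ (nn.length : Int) := by
  have hlt : v.toNat < nn.length := by omega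
  have : pvNx nn v = nn[v.toNat] := by
    unfold pvNx; exact PySem.List.pyGetD_eq_getElem nn 0 h0 (by exact_mod_cast h1)
  rw [this]
  exact hPre.2 _ (List.getElem_mem hlt)

theorem pvStep_range {fun_ nn : List Int} (hPre : Pre_solve fun_ nn) {v : Int}
    (h0 : 0 ≤ v) (h1 : v < (nn.length : Int)) (hnz : pvNx nn v ≠ 0) :
    0 ≤ pvStep nn v ∧ pvStep nn v < (nn.length : Int) := by
  have := pvNx_range hPre h0 h1
  unfold pvStep; omega

def pvChain (nn : List Int) : Nat → Int → List Int
  | 0, v => [v]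
  | d + 1, v => v :: pvChain nn d (pvStep nn v)

theorem length_pvChain (nn : List Int) : ∀ (d : Nat) (v : Int),
    (pvChain nn d v).length = d + 1 := by
  intro d
  induction d with
  | zero => intro v; rfl
  | succ d ih => intro v; simp [pvChain, ih]

theorem mem_pvChain_rd {nn : List Int} : ∀ {d : Nat} {v u : Int},
    pvRd nn d v → u ∈ pvChain nn d v → ∃ e ≤ d, pvRd nn e u := by
  intro d
  induction d with
  | zero =>
    intro v u h hm
    simp [pvChain] at hm; subst hm
    exact ⟨0, le_refl _, h⟩
  | succ d ih =>
    intro v u h hm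
    simp [pvChain] at hm
    rcases hm with rfl | hm
    · exact ⟨d + 1, le_refl _, h⟩
    · simp [pvRd] at h
      obtain ⟨e, he, hrd⟩ := ih h.2 hm
      exact ⟨e, by omega, hrd⟩

theorem nodup_pvChain {nn : List Int} : ∀ {d : Nat} {v : Int},
    pvRd nn d v → (pvChain nn d v).Nodup := by
  intro d
  induction d with
  | zero => intro v _; simp [pvChain]
  | succ d ih =>
    intro v h
    have h' := h
    simp [pvRd] at h'
    simp [pvChain]
    constructor
    · intro hm
      obtain ⟨e, he, hrd⟩ := mem_pvChain_rd h'.2 hm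
      have := pvRd_unique h hrd
      omega
    · exact ih h'.2

theorem mem_pvChain_range {fun_ nn : List Int} (hPre : Pre_solve fun_ nn) :
    ∀ {d : Nat} {v : Int}, pvRd nn d v → 0 ≤ v → v < (nn.length : Int) →
    ∀ u ∈ pvChain nn d v, 0 ≤ u ∧ u < (nn.length : Int) := by
  intro d
  induction d with
  | zero =>
    intro v _ h0 h1 u hm
    simp [pvChain] at hm; subst hm; exact ⟨h0, h1⟩
  | succ d ih =>
    intro v h h0 h1 u hm
    simp [pvRd] at h
    simp [pvChain] at hm
    rcases hm with rfl | hm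
    · exact ⟨h0, h1⟩
    · have hs := pvStep_range hPre h0 h1 (by simpa using h.1)
      exact ih h.2 hs.1 hs.2 u hm

theorem pvIter_succ_right (nn : List Int) : ∀ (t : Nat) (u : Int),
    pvIter nn (t + 1) u = pvStep nn (pvIter nn t u) := by
  intro t
  induction t with
  | zero => intro u; rfl
  | succ t ih => intro u; rw [show t + 1 + 1 = (t + 1) + 1 from rfl]
                 show pvIter nn (t + 1) (pvStep nn u) = _
                 rw [ih]; rfl

theorem pvIter_range {fun_ nn : List Int} (hPre : Pre_solve fun_ nn) :
    ∀ {t e : Nat} {u : Int}, pvRd nn e u → t ≤ e → 0 ≤ u → u < (nn.length : Int) →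
    0 ≤ pvIter nn t u ∧ pvIter nn t u < (nn.length : Int) := by
  intro t
  induction t with
  | zero => intro e u _ _ h0 h1; exact ⟨h0, h1⟩
  | succ t ih =>
    intro e u h ht h0 h1
    cases e with
    | zero => omega
    | succ e =>
      simp [pvRd] at h
      have hs := pvStep_range hPre h0 h1 (by simpa using h.1)
      exact ih h.2 (by omega) hs.1 hs.2

theorem pvRd_lt_len {fun_ nn : List Int} (hPre : Pre_solve fun_ nn) :
    ∀ {d : Nat} {v : Int}, pvRd nn d v → 0 ≤ v → v < (nn.length : Int) → d < nn.length := by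
  intro d v h h0 h1
  have hnd := nodup_pvChain h
  have hlen := length_pvChain nn d v
  have hsub : (pvChain nn d v).toFinset ⊆ Finset.Ico (0 : Int) (nn.length : Int) := by
    intro u hu
    rw [List.mem_toFinset] at hu
    have := mem_pvChain_range hPre h h0 h1 u hu
    rw [Finset.mem_Ico]; exact this
  have hcard := Finset.card_le_card hsub
  rw [List.toFinset_card_of_nodup hnd, hlen] at hcard
  have : (Finset.Ico (0 : Int) (nn.length : Int)).card = nn.length := by
    rw [Int.card_Ico]; omega
  omega

theorem pvRd_child {nn : List Int} {v c : Int} {d : Nat}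
    (hc : c ∈ pvCh nn v) (hv : 0 ≤ v) (hrd : pvRd nn d v) : pvRd nn (d + 1) c := by
  rw [mem_pvCh] at hc
  have hs : pvStep nn c = v := by unfold pvStep; rw [hc.2]; ring
  have hnz : pvNx nn c ≠ 0 := by rw [hc.2]; omega
  simp [pvRd, hs, hnz, hrd]

theorem mem_pvT {nn : List Int} {d : Nat} {u v : Int} :
    u ∈ pvT nn d v ↔ (0 ≤ u ∧ u < (nn.length : Int)) ∧
      ∃ e, e < nn.length ∧ pvRd nn e u ∧ d ≤ e ∧ pvIter nn (e - d) u = v := by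
  simp [pvT, List.mem_toFinset, PySem.List.mem_pyRange_one,
    List.any_eq_true, List.mem_range]
  tauto

theorem self_mem_pvT {fun_ nn : List Int} (hPre : Pre_solve fun_ nn) {d : Nat} {v : Int}
    (hrd : pvRd nn d v) (h0 : 0 ≤ v) (h1 : v < (nn.length : Int)) : v ∈ pvT nn d v := by
  rw [mem_pvT]
  exact ⟨⟨h0, h1⟩, d, pvRd_lt_len hPre hrd h0 h1, hrd, le_refl _, by simp [pvIter]⟩

theorem pvT_eq {fun_ nn : List Int} (hPre : Pre_solve fun_ nn) {d : Nat} {v : Int}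
    (hrd : pvRd nn d v) (h0 : 0 ≤ v) (h1 : v < (nn.length : Int)) :
    pvT nn d v = insert v ((pvCh nn v).toFinset.biUnion (fun c => pvT nn (d + 1) c)) := by
  ext u
  rw [mem_pvT, Finset.mem_insert, Finset.mem_biUnion]
  constructor
  · rintro ⟨⟨hu0, hu1⟩, e, helt, hrdu, hde, hit⟩
    by_cases hev : e = d
    · left
      subst hev
      simpa [pvIter] using hit
    · right
      have hde1 : d + 1 ≤ e := by omega
      refine ⟨pvIter nn (e - (d + 1)) u, ?_, ?_⟩
      · rw [List.mem_toFinset, mem_pvCh]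
        have hrange := pvIter_range hPre hrdu (by omega : e - (d + 1) ≤ e) hu0 hu1
        refine ⟨hrange, ?_⟩
        have hsr : pvIter nn (e - d) u = pvStep nn (pvIter nn (e - (d + 1)) u) := by
          rw [show e - d = (e - (d + 1)) + 1 from by omega, pvIter_succ_right]
        rw [hsr] at hit
        unfold pvStep at hit
        omega
      · rw [mem_pvT]
        exact ⟨⟨hu0, hu1⟩, e, helt, hrdu, hde1, rfl⟩
  · rintro (rfl | ⟨c, hc, hm⟩)
    · exact (mem_pvT.mp (self_mem_pvT hPre hrd h0 h1))
    · rw [List.mem_toFinset] at hc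
      rw [mem_pvT] at hm
      obtain ⟨⟨hu0, hu1⟩, e, helt, hrdu, hde1, hit⟩ := hm
      refine ⟨⟨hu0, hu1⟩, e, helt, hrdu, by omega, ?_⟩
      rw [show e - d = (e - (d + 1)) + 1 from by omega, pvIter_succ_right, hit]
      rw [mem_pvCh] at hc
      unfold pvStep
      omega

theorem card_pvT {fun_ nn : List Int} (hPre : Pre_solve fun_ nn) {d : Nat} {v : Int}
    (hrd : pvRd nn d v) (h0 : 0 ≤ v) (h1 : v < (nn.length : Int)) :
    (pvT nn d v).card = 1 + ((pvCh nn v).map (fun c => (pvT nn (d + 1) c).card)).sum := by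
  rw [pvT_eq hPre hrd h0 h1]
  have hnotmem : v ∉ (pvCh nn v).toFinset.biUnion (fun c => pvT nn (d + 1) c) := by
    rw [Finset.mem_biUnion]
    rintro ⟨c, _, hm⟩
    rw [mem_pvT] at hm
    obtain ⟨_, e, _, hrdv, hde1, _⟩ := hm
    have := pvRd_unique hrd hrdv
    omega
  rw [Finset.card_insert_of_notMem hnotmem]
  have hdisj : ∀ c ∈ (pvCh nn v).toFinset, ∀ c' ∈ (pvCh nn v).toFinset, c ≠ c' →
      Disjoint (pvT nn (d + 1) c) (pvT nn (d + 1) c') := by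
    intro c _ c' _ hne
    rw [Finset.disjoint_left]
    intro u hm hm'
    rw [mem_pvT] at hm hm'
    obtain ⟨_, e, _, hrdu, hde, hit⟩ := hm
    obtain ⟨_, e', _, hrdu', hde', hit'⟩ := hm'
    have := pvRd_unique hrdu hrdu'
    subst this
    rw [hit] at hit'
    exact hne hit'
  rw [Finset.card_biUnion hdisj]
  have hnd : (pvCh nn v).Nodup :=
    (PySem.List.nodup_pyRange_one 0 (nn.length : Int)).filter _
  rw [List.sum_toFinset _ hnd]
  omega

theorem card_pvT_le {nn : List Int} (d : Nat) (v : Int) : (pvT nn d v).card ≤ nn.length := by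
  unfold pvT
  calc _ ≤ ((PySem.List.pyRange 0 (nn.length : Int) 1).filter _).length :=
        List.toFinset_card_le _
    _ ≤ (PySem.List.pyRange 0 (nn.length : Int) 1).length := List.length_filter_le _ _
    _ = nn.length := by rw [PySem.List.length_pyRange_one]; omega

-- A-side structure lemmas
theorem pvSinksA_eq (nn : List Int) :
    pvSinksA nn = (PySem.List.pyRange 0 (nn.length : Int) 1).filter (fun i => pvNx nn i == 0) := by
  unfold pvSinksA
  rw [PySem.List.foldl_append_if_eq_filter]
  rfl

theorem pvD0_getD (l : List Int) (c : Int) :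
    ((l.foldl (fun d i => d.insert i ([] : List Int)) PySem.Dict.empty).getD c []) = [] := by
  suffices h : ∀ (d : PySem.Dict Int (List Int)), (∀ x, d.getD x [] = []) →
      ∀ x, (l.foldl (fun d i => d.insert i ([] : List Int)) d).getD x [] = [] by
    exact h _ (by simp [PySem.Dict.getD_empty]) c
  induction l with
  | nil => intro d h x; exact h x
  | cons i t ih =>
    intro d h x
    refine ih _ ?_ x
    intro y
    rw [PySem.Dict.getD_insert]
    split
    · rfl
    · exact h y

theorem pyGetD_pySetD_int {α : Type} (xs : List α) (n m : Int) (v d : α)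
    (hn0 : 0 ≤ n) (hn1 : n < (xs.length : Int)) (hm0 : 0 ≤ m) :
    PySem.List.pyGetD (PySem.List.pySetD xs n v) m d
      = if m = n then v else PySem.List.pyGetD xs m d := by
  have hn : ((n.toNat : Nat) : Int) = n := by omega
  have hm : ((m.toNat : Nat) : Int) = m := by omega
  rw [← hn, ← hm, PySem.List.pyGetD_pySetD_natCast xs n.toNat m.toNat v d (by omega)]
  by_cases h : m = n
  · rw [if_pos (by omega : m.toNat = n.toNat),
      if_pos (by omega : ((m.toNat : Nat) : Int) = ((n.toNat : Nat) : Int))]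
  · rw [if_neg (by omega : ¬ m.toNat = n.toNat),
      if_neg (by omega : ¬ ((m.toNat : Nat) : Int) = ((n.toNat : Nat) : Int))]

theorem pvPrevsA_getD {fun_ nn : List Int} (_hPre : Pre_solve fun_ nn) {c : Int}
    (h0 : 0 ≤ c) : (pvPrevsA nn).getD c [] = pvCh nn c := by
  unfold pvPrevsA
  have hshape : (fun (d : PySem.Dict Int (List Int)) i =>
        if PySem.List.pyGetD nn i 0 == 0 then d
        else d.modify (PySem.List.pyGetD nn i 0 - 1) [] (· ++ [i]))
      = (fun (d : PySem.Dict Int (List Int)) i =>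
        if (!(pvNx nn i == 0)) = true then d.modify (pvNx nn i - 1) [] (· ++ [i]) else d) := by
    funext d i
    unfold pvNx
    by_cases h : PySem.List.pyGetD nn i 0 == 0 <;> simp [h]
  rw [hshape, PySem.List.foldl_if_eq_foldl_filter]
  have hmap : ((PySem.List.pyRange 0 (nn.length : Int) 1).filter
        (fun i => !(pvNx nn i == 0))).foldl
        (fun (d : PySem.Dict Int (List Int)) i => d.modify (pvNx nn i - 1) [] (· ++ [i]))
        ((PySem.List.pyRange 0 (nn.length : Int) 1).foldl
          (fun d i => d.insert i ([] : List Int)) PySem.Dict.empty)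
      = (((PySem.List.pyRange 0 (nn.length : Int) 1).filter
          (fun i => !(pvNx nn i == 0))).map (fun i => (pvNx nn i - 1, i))).foldl
        (fun (d : PySem.Dict Int (List Int)) p => d.modify p.1 [] (· ++ [p.2]))
        ((PySem.List.pyRange 0 (nn.length : Int) 1).foldl
          (fun d i => d.insert i ([] : List Int)) PySem.Dict.empty) := by
    rw [List.foldl_map]
  rw [hmap, PySem.Dict.getD_foldl_modify_append, pvD0_getD, List.nil_append,
    List.filter_map, List.map_map]
  unfold pvCh
  rw [List.filter_filter]
  have : ((fun (x : Int × Int) => x.2) ∘ fun i => (pvNx nn i - 1, i)) = (id : Int → Int) := by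
    funext i; rfl
  rw [this, List.map_id]
  apply List.filter_congr
  intro i _
  show (((pvNx nn i - 1, i).1 == c) && !(pvNx nn i == 0)) = (pvNx nn i == c + 1)
  rw [Bool.eq_iff_iff]
  simp only [Bool.and_eq_true, beq_iff_eq, Bool.not_eq_true']
  constructor
  · rintro ⟨h1, h2⟩
    simp only [beq_eq_false_iff_ne, ne_eq] at h2
    omega
  · intro h
    constructor
    · omega
    · simp only [beq_eq_false_iff_ne, ne_eq]
      omega

-- B-side structure lemmas
theorem pvSinksB_eq (nn : List Int) :
    pvSinksB nn = (PySem.List.pyRange 0 (nn.length : Int) 1).filter (fun i => pvNx nn i == 0) := by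
  unfold pvSinksB
  rw [PySem.List.enumerate_eq_map_pyRange nn 0, List.filter_map, List.map_map]
  simp [pvNx, Function.comp_def]

theorem pvChildrenB_getD {fun_ nn : List Int} (hPre : Pre_solve fun_ nn) {c : Int}
    (h0 : 0 ≤ c) (h1 : c < (nn.length : Int)) :
    PySem.List.pyGetD (pvChildrenB nn) c [] = pvCh nn c := by
  have key : ∀ (l : List Int) (ch0 : List (List Int)),
      (∀ i ∈ l, 0 ≤ pvNx nn i ∧ pvNx nn i ≤ (ch0.length : Int)) →
      ∀ c, 0 ≤ c → c < (ch0.length : Int) →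
      PySem.List.pyGetD
        (l.foldl (fun ch i => if pvNx nn i == 0 then ch
          else PySem.List.pySetD ch (pvNx nn i - 1)
            (PySem.List.pyGetD ch (pvNx nn i - 1) [] ++ [i])) ch0) c []
      = PySem.List.pyGetD ch0 c [] ++ l.filter (fun i => pvNx nn i == c + 1) := by
    intro l
    induction l with
    | nil => intro ch0 _ c _ _; simp
    | cons i t ih =>
      intro ch0 hb c hc0 hc1
      simp only [List.foldl_cons, List.filter_cons]
      by_cases hz : pvNx nn i = 0
      · rw [if_pos (show (pvNx nn i == 0) = true by simp [hz])]
        rw [if_neg (show ¬ ((pvNx nn i == c + 1) = true) by simp [hz]; omega)]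
        exact ih ch0 (fun j hj => hb j (List.mem_cons_of_mem _ hj)) c hc0 hc1
      · rw [if_neg (show ¬ ((pvNx nn i == 0) = true) by simp [hz])]
        have hbi := hb i (List.mem_cons_self)
        set ch1 := PySem.List.pySetD ch0 (pvNx nn i - 1)
          (PySem.List.pyGetD ch0 (pvNx nn i - 1) [] ++ [i]) with hch1
        have hlen : (ch1.length : Int) = (ch0.length : Int) := by
          rw [hch1, PySem.List.length_pySetD]
        rw [ih ch1 (fun j hj => by rw [hlen]; exact hb j (List.mem_cons_of_mem _ hj))
          c hc0 (by omega)]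
        rw [hch1, pyGetD_pySetD_int ch0 (pvNx nn i - 1) c _ [] (by omega) (by omega) hc0]
        by_cases he : pvNx nn i = c + 1
        · rw [if_pos (show (pvNx nn i == c + 1) = true by simp [he])]
          rw [if_pos (show c = pvNx nn i - 1 by omega)]
          rw [show pvNx nn i - 1 = c from by omega]
          simp
        · rw [if_neg (show ¬ ((pvNx nn i == c + 1) = true) by simp [he])]
          rw [if_neg (show ¬ (c = pvNx nn i - 1) by omega)]
  unfold pvChildrenB
  have hen : (PySem.List.enumerate nn 0).foldl
      (fun ch p => if p.2 == 0 then ch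
        else PySem.List.pySetD ch (p.2 - 1) (PySem.List.pyGetD ch (p.2 - 1) [] ++ [p.1]))
      (List.replicate nn.length ([] : List Int))
    = (PySem.List.pyRange 0 (nn.length : Int) 1).foldl
      (fun ch i => if pvNx nn i == 0 then ch
        else PySem.List.pySetD ch (pvNx nn i - 1)
          (PySem.List.pyGetD ch (pvNx nn i - 1) [] ++ [i]))
      (List.replicate nn.length ([] : List Int)) := by
    rw [PySem.List.enumerate_eq_map_pyRange nn 0, List.foldl_map]
    rfl
  rw [hen, key _ _ ?_ c h0 (by simp; omega)]
  · have hrep : PySem.List.pyGetD (List.replicate nn.length ([] : List Int)) c [] = [] := by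
      rw [PySem.List.pyGetD_eq_getElem _ [] h0 (by simp; omega)]
      simp
    rw [hrep, List.nil_append]
    rfl
  · intro i hi
    rw [PySem.List.mem_pyRange_one] at hi
    have := pvNx_range hPre hi.1 hi.2
    simp only [List.length_replicate]
    omega

-- A's inner fold, split into min and sum components
theorem pvAfold_split (l : List Int) (g : Int → Int × Int) (o : Option Int) (a : Int) :
    l.foldl (fun (acc : Option Int × Int) p =>
        ((match acc.1 with
          | none => some (g p).1
          | some m => if (g p).1 < m then some (g p).1 else some m), acc.2 + (g p).2 + (g p).1))
      (o, a)
    = ((l.map (fun p => (g p).1)).foldl (fun o x =>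
          match o with
          | none => some x
          | some m => if x < m then some x else some m) o,
       a + (l.map (fun p => (g p).2 + (g p).1)).sum) := by
  induction l generalizing o a with
  | nil => simp
  | cons x t ih => simp [List.foldl_cons, ih]; ring

theorem pvMinFold_eq (l : List Int) :
    l.foldl (fun o x =>
        match o with
        | none => some x
        | some m => if x < m then some x else some m) none
      = PySem.List.min? l (fun x => x) := by
  have key : ∀ (t : List Int) (m : Int),
      t.foldl (fun o x =>
        match o with
        | none => some x
        | some m => if x < m then some x else some m) (some m) = some (t.foldl min m) := by
    intro t
    induction t with
    | nil => intro m; rfl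
    | cons x t ih =>
      intro m
      have : (if x < m then some x else some m) = some (min m x) := by
        split <;> simp <;> omega
      simp only [List.foldl_cons, this, ih]
  cases l with
  | nil => rfl
  | cons x t => rw [PySem.List.min?_id_cons, List.foldl_cons, key]

-- fuel irrelevance for A's compute
theorem pvComputeA_irrel {fun_ nn : List Int} (hPre : Pre_solve fun_ nn) :
    ∀ {d : Nat} {v : Int}, pvRd nn d v → 0 ≤ v → v < (nn.length : Int) →
    ∀ {f f' : Nat}, nn.length - d ≤ f → nn.length - d ≤ f' →
    pvComputeA (pvPrevsA nn) fun_ f v = pvComputeA (pvPrevsA nn) fun_ f' v := by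
  suffices main : ∀ k : Nat, ∀ {d : Nat} {v : Int} {f f' : Nat}, nn.length - d = k →
      pvRd nn d v → 0 ≤ v → v < (nn.length : Int) →
      nn.length - d ≤ f → nn.length - d ≤ f' →
      pvComputeA (pvPrevsA nn) fun_ f v = pvComputeA (pvPrevsA nn) fun_ f' v by
    intro d v hrd h0 h1 f f' hf hf'
    exact main (nn.length - d) rfl hrd h0 h1 hf hf'
  intro k
  induction k using Nat.strong_induction_on with
  | _ k ih =>
    intro d v f f' hk hrd h0 h1 hf hf'
    have hd : d < nn.length := pvRd_lt_len hPre hrd h0 h1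
    obtain ⟨f1, rfl⟩ : ∃ f1, f = f1 + 1 := ⟨f - 1, by omega⟩
    obtain ⟨f1', rfl⟩ : ∃ g, f' = g + 1 := ⟨f' - 1, by omega⟩
    have hch : ∀ c ∈ pvCh nn v,
        pvComputeA (pvPrevsA nn) fun_ f1 c = pvComputeA (pvPrevsA nn) fun_ f1' c := by
      intro c hc
      have hc' := mem_pvCh.mp hc
      have hrdc := pvRd_child hc h0 hrd
      exact ih (nn.length - (d + 1)) (by omega) rfl hrdc hc'.1.1 hc'.1.2
        (by omega) (by omega)
    simp only [pvComputeA, pvPrevsA_getD hPre h0]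
    by_cases hps : pvCh nn v = []
    · simp [hps]
    · simp only [if_neg hps]
      rw [pvAfold_split (pvCh nn v) (pvComputeA (pvPrevsA nn) fun_ f1) none 0,
        pvAfold_split (pvCh nn v) (pvComputeA (pvPrevsA nn) fun_ f1') none 0]
      rw [List.map_congr_left
          (fun c hc => by rw [hch c hc] :
            ∀ c ∈ pvCh nn v, (pvComputeA (pvPrevsA nn) fun_ f1 c).1
              = (pvComputeA (pvPrevsA nn) fun_ f1' c).1),
        List.map_congr_left
          (fun c hc => by rw [hch c hc] :
            ∀ c ∈ pvCh nn v, (pvComputeA (pvPrevsA nn) fun_ f1 c).2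
                + (pvComputeA (pvPrevsA nn) fun_ f1 c).1
              = (pvComputeA (pvPrevsA nn) fun_ f1' c).2
                + (pvComputeA (pvPrevsA nn) fun_ f1' c).1)]

-- canonical value of a tree node
def pvVA (fun_ nn : List Int) (v : Int) : Int × Int :=
  pvComputeA (pvPrevsA nn) fun_ (nn.length + 1) v

theorem pvVA_unfold {fun_ nn : List Int} (hPre : Pre_solve fun_ nn) {d : Nat} {v : Int}
    (hrd : pvRd nn d v) (h0 : 0 ≤ v) (h1 : v < (nn.length : Int)) :
    pvVA fun_ nn v =
      if pvCh nn v = [] then (PySem.List.pyGetD fun_ v 0, 0)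
      else
        let m := ((PySem.List.min? ((pvCh nn v).map (fun c => (pvVA fun_ nn c).1)) (fun x => x)).getD 0)
        (max (PySem.List.pyGetD fun_ v 0) m,
         ((pvCh nn v).map (fun c => (pvVA fun_ nn c).2 + (pvVA fun_ nn c).1)).sum - m) := by
  have hd : d < nn.length := pvRd_lt_len hPre hrd h0 h1
  have hch : ∀ c ∈ pvCh nn v,
      pvComputeA (pvPrevsA nn) fun_ nn.length c = pvVA fun_ nn c := by
    intro c hc
    have hc' := mem_pvCh.mp hc
    have hrdc := pvRd_child hc h0 hrd
    exact pvComputeA_irrel hPre hrdc hc'.1.1 hc'.1.2 (by omega) (by omega)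
  show pvComputeA (pvPrevsA nn) fun_ (nn.length + 1) v = _
  simp only [pvComputeA, pvPrevsA_getD hPre h0]
  by_cases hps : pvCh nn v = []
  · simp [hps]
  · simp only [if_neg hps]
    rw [pvAfold_split (pvCh nn v) (pvComputeA (pvPrevsA nn) fun_ nn.length) none 0]
    rw [List.map_congr_left
        (fun c hc => by rw [hch c hc] :
          ∀ c ∈ pvCh nn v, (pvComputeA (pvPrevsA nn) fun_ nn.length c).1
            = (pvVA fun_ nn c).1),
      List.map_congr_left
        (fun c hc => by rw [hch c hc] :
          ∀ c ∈ pvCh nn v, (pvComputeA (pvPrevsA nn) fun_ nn.length c).2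
              + (pvComputeA (pvPrevsA nn) fun_ nn.length c).1
            = (pvVA fun_ nn c).2 + (pvVA fun_ nn c).1)]
    rw [pvMinFold_eq]
    simp

theorem pvLoopB_nil (ch : List (List Int)) (fun_ : List Int) (f : Nat)
    (σ : PySem.Dict Int Int × PySem.Dict Int Int) : pvLoopB ch fun_ f [] σ = σ := by
  cases f <;> rfl

theorem pvLoopB_false (ch : List (List Int)) (fun_ : List Int) (f : Nat) (v : Int)
    (rest : List (Int × Bool)) (og st : PySem.Dict Int Int) :
    pvLoopB ch fun_ (f + 1) ((v, false) :: rest) (og, st)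
      = pvLoopB ch fun_ f
          (((PySem.List.pyGetD ch v []).reverse.map (fun c => (c, false))) ++ (v, true) :: rest)
          (og, st) := by
  simp [pvLoopB]

theorem pvLoopB_true_nil (ch : List (List Int)) (fun_ : List Int) (f : Nat) (v : Int)
    (rest : List (Int × Bool)) (og st : PySem.Dict Int Int)
    (h : PySem.List.pyGetD ch v [] = []) :
    pvLoopB ch fun_ (f + 1) ((v, true) :: rest) (og, st)
      = pvLoopB ch fun_ f rest
          (og.insert v (PySem.List.pyGetD fun_ v 0), st.insert v 0) := by
  simp [pvLoopB, h]

theorem pvLoopB_true_cons (ch : List (List Int)) (fun_ : List Int) (f : Nat) (v : Int)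
    (rest : List (Int × Bool)) (og st : PySem.Dict Int Int)
    (h : ¬ (PySem.List.pyGetD ch v [] = [])) :
    pvLoopB ch fun_ (f + 1) ((v, true) :: rest) (og, st)
      = pvLoopB ch fun_ f rest
          (og.insert v (max (PySem.List.pyGetD fun_ v 0)
            ((PySem.List.min? ((PySem.List.pyGetD ch v []).map (fun c => og.getD c 0))
              (fun x => x)).getD 0)),
           st.insert v
            (((PySem.List.pyGetD ch v []).map (fun c => st.getD c 0 +
                (og.insert v (max (PySem.List.pyGetD fun_ v 0)
                  ((PySem.List.min? ((PySem.List.pyGetD ch v []).map (fun c => og.getD c 0))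
                    (fun x => x)).getD 0))).getD c 0)).sum
              - ((PySem.List.min? ((PySem.List.pyGetD ch v []).map (fun c => og.getD c 0))
                  (fun x => x)).getD 0))) := by
  simp only [pvLoopB, Bool.true_eq_false, if_false, if_neg h]

-- the main simulation lemma: processing (v, false) consumes exactly 2·|T v| fuel and
-- sets every subtree node's dict entries to its compute value
theorem pvSIM {fun_ nn : List Int} (hPre : Pre_solve fun_ nn) :
    ∀ {d : Nat} {v : Int}, pvRd nn d v → 0 ≤ v → v < (nn.length : Int) →
    ∀ og st, ∃ og' st',
      (∀ (rest : List (Int × Bool)) (F : Nat),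
        pvLoopB (pvChildrenB nn) fun_ (2 * (pvT nn d v).card + F) ((v, false) :: rest) (og, st)
          = pvLoopB (pvChildrenB nn) fun_ F rest (og', st')) ∧
      (∀ u, og'.getD u 0 = if u ∈ pvT nn d v then (pvVA fun_ nn u).1 else og.getD u 0) ∧
      (∀ u, st'.getD u 0 = if u ∈ pvT nn d v then (pvVA fun_ nn u).2 else st.getD u 0) := by
  suffices main : ∀ k : Nat, ∀ {d : Nat} {v : Int}, nn.length - d = k →
      pvRd nn d v → 0 ≤ v → v < (nn.length : Int) →
      ∀ og st, ∃ og' st',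
        (∀ (rest : List (Int × Bool)) (F : Nat),
          pvLoopB (pvChildrenB nn) fun_ (2 * (pvT nn d v).card + F) ((v, false) :: rest) (og, st)
            = pvLoopB (pvChildrenB nn) fun_ F rest (og', st')) ∧
        (∀ u, og'.getD u 0 = if u ∈ pvT nn d v then (pvVA fun_ nn u).1 else og.getD u 0) ∧
        (∀ u, st'.getD u 0 = if u ∈ pvT nn d v then (pvVA fun_ nn u).2 else st.getD u 0) by
    intro d v hrd h0 h1 og st
    exact main (nn.length - d) rfl hrd h0 h1 og st
  intro k
  induction k using Nat.strong_induction_on with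
  | _ k ih =>
    intro d v hk hrd h0 h1 og st
    have hd : d < nn.length := pvRd_lt_len hPre hrd h0 h1
    -- processing a list of children of v, in any order
    have inner : ∀ (l : List Int), (∀ c ∈ l, c ∈ pvCh nn v) → ∀ og st, ∃ og' st',
        (∀ (rest : List (Int × Bool)) (F : Nat),
          pvLoopB (pvChildrenB nn) fun_
              (2 * (l.map (fun c => (pvT nn (d + 1) c).card)).sum + F)
              (l.map (fun c => (c, false)) ++ rest) (og, st)
            = pvLoopB (pvChildrenB nn) fun_ F rest (og', st')) ∧
        (∀ u, og'.getD u 0 = if ∃ c ∈ l, u ∈ pvT nn (d + 1) c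
            then (pvVA fun_ nn u).1 else og.getD u 0) ∧
        (∀ u, st'.getD u 0 = if ∃ c ∈ l, u ∈ pvT nn (d + 1) c
            then (pvVA fun_ nn u).2 else st.getD u 0) := by
      intro l
      induction l with
      | nil =>
        intro _ og st
        exact ⟨og, st, fun rest F => by simp, fun u => by simp, fun u => by simp⟩
      | cons c t iht =>
        intro hmem og st
        have hc := mem_pvCh.mp (hmem c List.mem_cons_self)
        have hrdc := pvRd_child (hmem c List.mem_cons_self) h0 hrd
        obtain ⟨og1, st1, hrun1, hog1, hst1⟩ :=
          ih (nn.length - (d + 1)) (by omega) rfl hrdc hc.1.1 hc.1.2 og st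
        obtain ⟨og2, st2, hrun2, hog2, hst2⟩ :=
          iht (fun c' hc' => hmem c' (List.mem_cons_of_mem _ hc')) og1 st1
        refine ⟨og2, st2, ?_, ?_, ?_⟩
        · intro rest F
          have harith : 2 * ((c :: t).map (fun c => (pvT nn (d + 1) c).card)).sum + F
              = 2 * (pvT nn (d + 1) c).card
                + (2 * (t.map (fun c => (pvT nn (d + 1) c).card)).sum + F) := by
            simp [List.map_cons, List.sum_cons]; ring
          rw [harith]
          simp only [List.map_cons, List.cons_append]
          rw [hrun1 (t.map (fun c => (c, false)) ++ rest) _, hrun2 rest F]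
        · intro u
          rw [hog2 u, hog1 u]
          by_cases h1 : ∃ c' ∈ t, u ∈ pvT nn (d + 1) c'
          · rw [if_pos h1, if_pos (by
              obtain ⟨c', hc', hu⟩ := h1
              exact ⟨c', List.mem_cons_of_mem _ hc', hu⟩)]
          · rw [if_neg h1]
            by_cases h2 : u ∈ pvT nn (d + 1) c
            · rw [if_pos h2, if_pos ⟨c, List.mem_cons_self, h2⟩]
            · rw [if_neg h2, if_neg (by
                rintro ⟨c', hc', hu⟩
                rcases List.mem_cons.mp hc' with rfl | hc'
                · exact h2 hu
                · exact h1 ⟨c', hc', hu⟩)]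
        · intro u
          rw [hst2 u, hst1 u]
          by_cases h1 : ∃ c' ∈ t, u ∈ pvT nn (d + 1) c'
          · rw [if_pos h1, if_pos (by
              obtain ⟨c', hc', hu⟩ := h1
              exact ⟨c', List.mem_cons_of_mem _ hc', hu⟩)]
          · rw [if_neg h1]
            by_cases h2 : u ∈ pvT nn (d + 1) c
            · rw [if_pos h2, if_pos ⟨c, List.mem_cons_self, h2⟩]
            · rw [if_neg h2, if_neg (by
                rintro ⟨c', hc', hu⟩
                rcases List.mem_cons.mp hc' with rfl | hc'
                · exact h2 hu
                · exact h1 ⟨c', hc', hu⟩)]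
    have hchB : PySem.List.pyGetD (pvChildrenB nn) v [] = pvCh nn v :=
      pvChildrenB_getD hPre h0 h1
    have hmemT : ∀ u, u ∈ pvT nn d v ↔ u = v ∨ ∃ c ∈ pvCh nn v, u ∈ pvT nn (d + 1) c := by
      intro u
      rw [pvT_eq hPre hrd h0 h1]
      simp [Finset.mem_insert, Finset.mem_biUnion, List.mem_toFinset]
    by_cases hps : pvCh nn v = []
    · -- leaf
      have hcard : (pvT nn d v).card = 1 := by
        rw [card_pvT hPre hrd h0 h1, hps]; simp
      have hVA : pvVA fun_ nn v = (PySem.List.pyGetD fun_ v 0, 0) := by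
        rw [pvVA_unfold hPre hrd h0 h1, if_pos hps]
      refine ⟨og.insert v (PySem.List.pyGetD fun_ v 0), st.insert v 0, ?_, ?_, ?_⟩
      · intro rest F
        rw [show 2 * (pvT nn d v).card + F = (F + 1) + 1 from by omega]
        rw [pvLoopB_false, hchB, hps]
        simp only [List.reverse_nil, List.map_nil, List.nil_append]
        rw [pvLoopB_true_nil _ _ _ _ _ _ _ (by rw [hchB, hps])]
      · intro u
        rw [PySem.Dict.getD_insert]
        by_cases hu : u = v
        · rw [if_pos hu, if_pos (by rw [hmemT]; exact Or.inl hu)]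
          rw [hu, hVA]
        · rw [if_neg hu, if_neg (by
            rw [hmemT]
            rintro (rfl | ⟨c, hc, _⟩)
            · exact hu rfl
            · rw [hps] at hc; exact absurd hc (List.not_mem_nil))]
      · intro u
        rw [PySem.Dict.getD_insert]
        by_cases hu : u = v
        · rw [if_pos hu, if_pos (by rw [hmemT]; exact Or.inl hu)]
          rw [hu, hVA]
        · rw [if_neg hu, if_neg (by
            rw [hmemT]
            rintro (rfl | ⟨c, hc, _⟩)
            · exact hu rfl
            · rw [hps] at hc; exact absurd hc (List.not_mem_nil))]
    · -- internal node
      obtain ⟨og1, st1, hrunI, hogI, hstI⟩ :=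
        inner (pvCh nn v).reverse (fun c hc => List.mem_reverse.mp hc) og st
      have hrevmem : ∀ u, (∃ c ∈ (pvCh nn v).reverse, u ∈ pvT nn (d + 1) c)
          ↔ (∃ c ∈ pvCh nn v, u ∈ pvT nn (d + 1) c) := by
        intro u; simp [List.mem_reverse]
      have hcnotv : ∀ c ∈ pvCh nn v, c ≠ v := by
        intro c hcm rfl
        have := pvRd_unique hrd (pvRd_child hcm h0 hrd)
        omega
      have hog1c : ∀ c ∈ pvCh nn v, og1.getD c 0 = (pvVA fun_ nn c).1 := by
        intro c hcm
        rw [hogI c, if_pos ((hrevmem c).mpr ⟨c, hcm, self_mem_pvT hPre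
          (pvRd_child hcm h0 hrd) (mem_pvCh.mp hcm).1.1 (mem_pvCh.mp hcm).1.2⟩)]
      have hst1c : ∀ c ∈ pvCh nn v, st1.getD c 0 = (pvVA fun_ nn c).2 := by
        intro c hcm
        rw [hstI c, if_pos ((hrevmem c).mpr ⟨c, hcm, self_mem_pvT hPre
          (pvRd_child hcm h0 hrd) (mem_pvCh.mp hcm).1.1 (mem_pvCh.mp hcm).1.2⟩)]
      set m : Int := (PySem.List.min? ((pvCh nn v).map (fun c => (pvVA fun_ nn c).1))
        (fun x => x)).getD 0 with hm
      set ogf := og1.insert v (max (PySem.List.pyGetD fun_ v 0) m) with hogf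
      set stf := st1.insert v
        (((pvCh nn v).map (fun c => (pvVA fun_ nn c).2 + (pvVA fun_ nn c).1)).sum - m)
        with hstf
      have hVA : pvVA fun_ nn v = (max (PySem.List.pyGetD fun_ v 0) m,
          ((pvCh nn v).map (fun c => (pvVA fun_ nn c).2 + (pvVA fun_ nn c).1)).sum - m) := by
        rw [pvVA_unfold hPre hrd h0 h1, if_neg hps]
      have hm1 : ((pvCh nn v).map (fun c => og1.getD c 0))
          = (pvCh nn v).map (fun c => (pvVA fun_ nn c).1) :=
        List.map_congr_left (fun c hc => hog1c c hc)
      have hsum1 : ((pvCh nn v).map (fun c => st1.getD c 0 + ogf.getD c 0)).sum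
          = ((pvCh nn v).map (fun c => (pvVA fun_ nn c).2 + (pvVA fun_ nn c).1)).sum := by
        refine congrArg List.sum (List.map_congr_left ?_)
        intro c hc
        rw [hst1c c hc, hogf, PySem.Dict.getD_insert, if_neg (hcnotv c hc), hog1c c hc]
      refine ⟨ogf, stf, ?_, ?_, ?_⟩
      · intro rest F
        have harith : 2 * (pvT nn d v).card + F
            = ((2 * ((pvCh nn v).reverse.map (fun c => (pvT nn (d + 1) c).card)).sum
                + (F + 1)) + 1) := by
          rw [card_pvT hPre hrd h0 h1, List.map_reverse, List.sum_reverse]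
          omega
        rw [harith, pvLoopB_false, hchB]
        have hstack : ((pvCh nn v).reverse.map (fun c => (c, false)))
            = (pvCh nn v).reverse.map (fun c => (c, false)) := rfl
        rw [hrunI ((v, true) :: rest) (F + 1)]
        rw [pvLoopB_true_cons _ _ _ _ _ _ _ (by rw [hchB]; exact hps)]
        rw [hchB]
        congr 2
        · rw [hogf, hm1, hm]
        · rw [hstf]
          congr 1
          rw [hm1, ← hm]
          have : ((pvCh nn v).map (fun c => st1.getD c 0 +
              (og1.insert v (max (PySem.List.pyGetD fun_ v 0) m)).getD c 0)).sum
              = ((pvCh nn v).map (fun c => st1.getD c 0 + ogf.getD c 0)).sum := by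
            rw [hogf]
          rw [this, hsum1]
      · intro u
        rw [hogf, PySem.Dict.getD_insert]
        by_cases hu : u = v
        · rw [if_pos hu, if_pos (by rw [hmemT]; exact Or.inl hu), hu, hVA]
        · rw [if_neg hu, hogI u]
          simp only [hrevmem u]
          by_cases h2 : ∃ c ∈ pvCh nn v, u ∈ pvT nn (d + 1) c
          · rw [if_pos h2, if_pos (by rw [hmemT]; exact Or.inr h2)]
          · rw [if_neg h2, if_neg (by
              rw [hmemT]
              rintro (rfl | hex)
              · exact hu rfl
              · exact h2 hex)]
      · intro u
        rw [hstf, PySem.Dict.getD_insert]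
        by_cases hu : u = v
        · rw [if_pos hu, if_pos (by rw [hmemT]; exact Or.inl hu), hu, hVA]
        · rw [if_neg hu, hstI u]
          simp only [hrevmem u]
          by_cases h2 : ∃ c ∈ pvCh nn v, u ∈ pvT nn (d + 1) c
          · rw [if_pos h2, if_pos (by rw [hmemT]; exact Or.inr h2)]
          · rw [if_neg h2, if_neg (by
              rw [hmemT]
              rintro (rfl | hex)
              · exact hu rfl
              · exact h2 hex)]

-- ===== VERDICT (by name: the statement is the Claim_ definition above) =====
theorem solve_spec : Claim_equal_solve := by
  unfold Claim_equal_solve Spec_solve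
  intro fun_ nn _hDom hPre
  show solve fun_ nn = solve_alt fun_ nn
  unfold solve solve_alt
  rw [pvSinksA_eq, pvSinksB_eq]
  simp only []
  have key : ∀ (l : List Int), (∀ s ∈ l, 0 ≤ s ∧ s < (nn.length : Int) ∧ pvNx nn s = 0) →
      ∀ og st (acc : Int),
      (l.foldl (fun (σ : (PySem.Dict Int Int × PySem.Dict Int Int) × Int) s =>
          let σ' := pvLoopB (pvChildrenB nn) fun_ (2 * nn.length + 1) [(s, false)] σ.1
          (σ', σ.2 + (σ'.2.getD s 0 + σ'.1.getD s 0))) ((og, st), acc)).2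
      = l.foldl (fun result s =>
          let os := pvComputeA (pvPrevsA nn) fun_ (nn.length + 1) s
          result + (os.2 + os.1)) acc := by
    intro l
    induction l with
    | nil => intro _ og st acc; rfl
    | cons s t iht =>
      intro hmem og st acc
      obtain ⟨hs0, hs1, hsz⟩ := hmem s List.mem_cons_self
      have hrd0 : pvRd nn 0 s := by simp [pvRd, hsz]
      obtain ⟨og', st', hrun, hog, hst⟩ := pvSIM hPre hrd0 hs0 hs1 og st
      have hcard := card_pvT_le (nn := nn) 0 s
      have hfuel : 2 * nn.length + 1
          = 2 * (pvT nn 0 s).card + (2 * nn.length + 1 - 2 * (pvT nn 0 s).card) := by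
        omega
      have hhead : pvLoopB (pvChildrenB nn) fun_ (2 * nn.length + 1) [(s, false)] (og, st)
          = (og', st') := by
        rw [hfuel, hrun [] _, pvLoopB_nil]
      have hselg : og'.getD s 0 = (pvVA fun_ nn s).1 := by
        rw [hog s, if_pos (self_mem_pvT hPre hrd0 hs0 hs1)]
      have hsels : st'.getD s 0 = (pvVA fun_ nn s).2 := by
        rw [hst s, if_pos (self_mem_pvT hPre hrd0 hs0 hs1)]
      simp only [List.foldl_cons, hhead]
      rw [iht (fun x hx => hmem x (List.mem_cons_of_mem _ hx)) og' st' _]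
      rw [hselg, hsels]
      rfl
  rw [← key ((PySem.List.pyRange 0 (nn.length : Int) 1).filter (fun i => pvNx nn i == 0))
      ?_ PySem.Dict.empty PySem.Dict.empty 0]
  intro x hx
  rw [List.mem_filter, PySem.List.mem_pyRange_one] at hx
  refine ⟨hx.1.1, hx.1.2, by simpa using hx.2⟩
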